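-- pv_equiv track=rewrite | github.com/k-koech/codility | angryfrogs.py | solution
-- ===== SOURCE A (Python) =====
-- def solution(blocks):
--     N = len(blocks)
--
--     # Create an array to store the maximum distances for each starting block
--     max_distances = [0] * N
--
--     # Calculate the maximum distance for each starting block
--     for i in range(N):
--         max_left = i
--         max_right = i
--
--         # Extend left
--         while max_left > 0 and blocks[max_left - 1] >= blocks[max_left]:
--             max_left -= 1
--
--         # Extend right
--         while max_right < N - 1 and blocks[max_right + 1] >= blocks[max_right]:
--             max_right += 1
--
--         # Calculate the maximum distance for this starting block
--         max_distances[i] = max_right - max_left + 1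
--
--     # Return the maximum value in the max_distances array
--     return max(max_distances)
-- ===== SOURCE B (Python) =====
-- def solution(blocks):
--     # O(N): one run-length map-accumulate helper applied to the list and to its
--     # reverse, combined with zip -- no index arithmetic, no per-index rescanning.
--     def runs(bs):
--         out, acc = [], 0
--         for prev, cur in zip(bs, bs[1:]):
--             acc = acc + 1 if prev >= cur else 0
--             out.append(acc)
--         return [0] + out if bs else []
--     left = runs(blocks)
--     right = runs(blocks[::-1])[::-1]
--     return max(l + r + 1 for l, r in zip(left, right))
-- ===== Notes on version B (the rewrite author's own statement) =====
-- stated objective: faster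
-- what changed: Replaced A's per-index while-loop extension (quadratic rescanning) by one linear run-length map-accumulate helper applied to the list and to its reverse, combined with zip.
import Mathlib
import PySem

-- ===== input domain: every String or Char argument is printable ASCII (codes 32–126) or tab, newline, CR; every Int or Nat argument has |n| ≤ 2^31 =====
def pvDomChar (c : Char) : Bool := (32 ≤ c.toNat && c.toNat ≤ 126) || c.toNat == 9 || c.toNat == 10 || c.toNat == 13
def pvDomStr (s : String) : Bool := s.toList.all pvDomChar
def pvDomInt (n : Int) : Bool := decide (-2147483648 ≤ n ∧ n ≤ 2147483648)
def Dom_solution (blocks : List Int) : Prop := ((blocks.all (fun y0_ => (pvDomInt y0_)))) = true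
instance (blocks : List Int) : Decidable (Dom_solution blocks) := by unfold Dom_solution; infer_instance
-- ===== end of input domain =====

-- B replaces A's quadratic per-index while-loop extension with one linear run-length
-- map-accumulate pass applied to the list and to its reverse, combined with zip;
-- proved equal to A on every non-empty list (Python's max raises on [], excluded by Pre_).


-- ===== PORT A =====
-- the 'while max_left > 0 and blocks[max_left-1] >= blocks[max_left]: max_left -= 1' loop
def pvExtLeft (blocks : List Int) : Nat → Nat
  | 0 => 0
  | (m+1) => if blocks.getD m 0 ≥ blocks.getD (m+1) 0 then pvExtLeft blocks m else m + 1

-- the 'while max_right < N-1 and blocks[max_right+1] >= blocks[max_right]: max_right += 1' loop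
def pvExtRight (blocks : List Int) (N : Nat) (m : Nat) : Nat :=
  if _h : m + 1 < N then
    if blocks.getD (m+1) 0 ≥ blocks.getD m 0 then pvExtRight blocks N (m+1) else m
  else m
termination_by N - m

def solution (blocks : List Int) : Int :=
  let N := blocks.length
  let max_distances :=
    (List.range N).map (fun i =>
      ((pvExtRight blocks N i : Int) - (pvExtLeft blocks i : Int) + 1))
  match PySem.List.max? max_distances (fun x => x) with   -- Python's max(...): raises on [], excluded by Pre_
  | some v => v
  | none => 0

-- ===== PORT B =====
-- Source B's 'for prev, cur in zip(bs, bs[1:])' loop: map-accumulate of run lengths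
def pvRuns (prev : Int) (rest : List Int) (acc : Nat) : List Nat :=
  match rest with
  | [] => []
  | cur :: rs =>
      let a := if prev ≥ cur then acc + 1 else 0
      a :: pvRuns cur rs a

-- Source B's 'runs': '[0] + out if bs else []'
def pvRunsAll (bs : List Int) : List Nat :=
  match bs with
  | [] => []
  | b :: rest => 0 :: pvRuns b rest 0

def solution_alt (blocks : List Int) : Int :=
  let left := pvRunsAll blocks
  let right := (pvRunsAll blocks.reverse).reverse
  match PySem.List.max?
      (List.zipWith (fun (l r : Nat) => (l : Int) + (r : Int) + 1) left right) (fun x => x) with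
  | some v => v
  | none => 0

-- ===== PRECONDITION & SPEC =====
-- Pre_ excludes only the empty list, on which Python's max() raises ValueError in A (and in B).
def Pre_solution (blocks : List Int) : Prop := blocks ≠ []
instance (blocks : List Int) : Decidable (Pre_solution blocks) := by unfold Pre_solution; infer_instance
def pvWitness_solution : List Int := [3, 1, 2]
def Spec_solution (blocks : List Int) (out : Int) : Prop := out = solution_alt blocks
instance (blocks : List Int) (out : Int) : Decidable (Spec_solution blocks out) := by unfold Spec_solution; infer_instance

-- ===== CLAIM (what is proved, stated in full; the proofs are below) =====
def Claim_equal_solution : Prop := ∀ (blocks : List Int), Dom_solution blocks → Pre_solution blocks → Spec_solution blocks (solution blocks)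

-- ===== LEMMAS AND PROOFS =====
-- index-wise run lengths used only by the proofs, bridging both ports
def pvLeftDP (blocks : List Int) : Nat → Nat
  | 0 => 0
  | (i+1) => if blocks.getD i 0 ≥ blocks.getD (i+1) 0 then pvLeftDP blocks i + 1 else 0

def pvRightDP (blocks : List Int) (N : Nat) (i : Nat) : Nat :=
  if _h : i + 1 < N then
    if blocks.getD (i+1) 0 ≥ blocks.getD i 0 then pvRightDP blocks N (i+1) + 1 else 0
  else 0
termination_by N - i

lemma pvExtLeft_add_leftDP (blocks : List Int) (i : Nat) :
    pvExtLeft blocks i + pvLeftDP blocks i = i := by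
  induction i with
  | zero => simp [pvExtLeft, pvLeftDP]
  | succ n ih =>
    simp only [pvExtLeft, pvLeftDP]
    split
    · omega
    · simp

lemma pvExtRight_eq_add_rightDP (blocks : List Int) (N : Nat) (i : Nat) :
    pvExtRight blocks N i = i + pvRightDP blocks N i := by
  unfold pvExtRight pvRightDP
  split
  · split
    · rw [pvExtRight_eq_add_rightDP blocks N (i+1)]; omega
    · simp
  · simp
termination_by N - i

lemma pvGetD_reverse (bs : List Int) (j : Nat) (h : j < bs.length) :
    bs.reverse.getD j 0 = bs.getD (bs.length - 1 - j) 0 := by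
  have hj : j < bs.reverse.length := by simpa using h
  have hk : bs.length - 1 - j < bs.length := by omega
  rw [List.getD_eq_getElem _ _ hj, List.getD_eq_getElem _ _ hk, List.getElem_reverse]

lemma pvRightDP_rev (bs : List Int) : ∀ k i, i + k + 1 = bs.length →
    pvRightDP bs bs.length i = pvLeftDP bs.reverse k := by
  intro k
  induction k with
  | zero =>
    intro i hi
    unfold pvRightDP pvLeftDP
    rw [dif_neg (by omega)]
  | succ m ih =>
    intro i hi
    unfold pvRightDP
    rw [dif_pos (by omega)]
    show _ = pvLeftDP bs.reverse (m+1)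
    unfold pvLeftDP
    rw [pvGetD_reverse bs m (by omega), pvGetD_reverse bs (m+1) (by omega)]
    have e1 : bs.length - 1 - m = i + 1 := by omega
    have e2 : bs.length - 1 - (m+1) = i := by omega
    rw [e1, e2, ih (i+1) (by omega)]

lemma pvRuns_eq (blocks : List Int) : ∀ (rest : List Int) (k : Nat),
    blocks.drop (k+1) = rest → k < blocks.length →
    pvRuns (blocks.getD k 0) rest (pvLeftDP blocks k)
      = (List.range (blocks.length - (k+1))).map (fun j => pvLeftDP blocks (k+1+j)) := by
  intro rest
  induction rest with
  | nil =>
    intro k hdrop _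
    have h1 : blocks.length - (k+1) = 0 := by
      have := congrArg List.length hdrop; simpa using this
    simp [pvRuns, h1]
  | cons c rs ih =>
    intro k hdrop hk
    have hkl : k + 1 < blocks.length := by
      have := congrArg List.length hdrop
      simp at this; omega
    have hget : blocks.getD (k+1) 0 = c := by
      have h0 : blocks[k+1]? = (blocks.drop (k+1))[0]? := by
        rw [List.getElem?_drop]
      rw [List.getD_eq_getElem?_getD, h0, hdrop]
      simp
    have hdrop2 : blocks.drop (k+2) = rs := by
      have : blocks.drop (k+2) = (blocks.drop (k+1)).drop 1 := by
        rw [List.drop_drop]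
      rw [this, hdrop]; simp
    have ha : pvLeftDP blocks (k+1) = (if blocks.getD k 0 ≥ c then pvLeftDP blocks k + 1 else 0) := by
      rw [← hget]; rfl
    have hlen : blocks.length - (k+1) = (blocks.length - (k+2)) + 1 := by omega
    rw [hlen, List.range_succ_eq_map, List.map_cons, List.map_map]
    show (if blocks.getD k 0 ≥ c then pvLeftDP blocks k + 1 else 0)
          :: pvRuns c rs (if blocks.getD k 0 ≥ c then pvLeftDP blocks k + 1 else 0) = _
    rw [← ha]
    congr 1
    have hIH := ih (k+1) hdrop2 hkl
    rw [hget] at hIH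
    rw [hIH]
    apply List.map_congr_left
    intro j _
    simp only [Function.comp]
    congr 1
    omega

lemma pvRunsAll_eq (bs : List Int) :
    pvRunsAll bs = (List.range bs.length).map (pvLeftDP bs) := by
  match bs with
  | [] => simp [pvRunsAll]
  | b :: rest =>
    show 0 :: pvRuns b rest 0 = _
    have h0 : (b :: rest).getD 0 0 = b := rfl
    have hL : pvLeftDP (b :: rest) 0 = 0 := rfl
    have hs := pvRuns_eq (b :: rest) rest 0 (by simp) (by simp)
    rw [h0, hL] at hs
    have hlen : (b :: rest).length = rest.length + 1 := by simp
    rw [hs, hlen, List.range_succ_eq_map, List.map_cons, List.map_map]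
    congr 1
    · have h2 : rest.length + 1 - (0+1) = rest.length := by omega
      rw [h2]
      apply List.map_congr_left
      intro j _
      show pvLeftDP (b :: rest) (0+1+j) = pvLeftDP (b :: rest) (j+1)
      have h3 : 0+1+j = j+1 := by omega
      rw [h3]

lemma pvZipWith_same {α β : Type} (f : α → α → β) (l : List α) :
    List.zipWith f l l = l.map (fun a => f a a) := by
  induction l with
  | nil => simp
  | cons a l _ => simp

lemma pvReverse_map_range {α : Type} (n : Nat) (f : Nat → α) :
    ((List.range n).map f).reverse = (List.range n).map (fun i => f (n - 1 - i)) := by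
  apply List.ext_getElem
  · simp
  · intro i h1 h2
    simp at h1 h2 ⊢

-- ===== VERDICT (by name: the statement is the Claim_ definition above) =====
theorem solution_spec : Claim_equal_solution := by
  intro blocks _ _
  show solution blocks = solution_alt blocks
  have hB : List.zipWith (fun (l r : Nat) => (l : Int) + (r : Int) + 1)
      (pvRunsAll blocks) ((pvRunsAll blocks.reverse).reverse)
      = (List.range blocks.length).map (fun i =>
          ((pvLeftDP blocks i : Int) + (pvRightDP blocks blocks.length i : Int) + 1)) := by
    rw [pvRunsAll_eq blocks, pvRunsAll_eq blocks.reverse, List.length_reverse,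
        pvReverse_map_range, List.zipWith_map, pvZipWith_same]
    apply List.map_congr_left
    intro i hi
    simp at hi
    have := pvRightDP_rev blocks (blocks.length - 1 - i) i (by omega)
    rw [this]
  have hA : ∀ i ∈ List.range blocks.length,
      ((pvExtRight blocks blocks.length i : Int) - (pvExtLeft blocks i : Int) + 1)
        = ((pvLeftDP blocks i : Int) + (pvRightDP blocks blocks.length i : Int) + 1) := by
    intro i _
    have h1 := pvExtLeft_add_leftDP blocks i
    have h2 := pvExtRight_eq_add_rightDP blocks blocks.length i
    rw [h2]
    push_cast
    omega
  show (match PySem.List.max? ((List.range blocks.length).map (fun i =>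
          ((pvExtRight blocks blocks.length i : Int) - (pvExtLeft blocks i : Int) + 1)))
          (fun x => x) with
        | some v => v
        | none => 0)
      = (match PySem.List.max? (List.zipWith (fun (l r : Nat) => (l : Int) + (r : Int) + 1)
          (pvRunsAll blocks) ((pvRunsAll blocks.reverse).reverse)) (fun x => x) with
        | some v => v
        | none => 0)
  rw [hB, List.map_congr_left hA]
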